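-- pv_equiv track=rewrite | github.com/posl/comment_recommendation | script/mod_gen/2_time/en/212_B/6.py | isWeak
-- ===== SOURCE A (Python) =====
-- def isWeak(pin):
--     for i in range(1,4):
--         if pin[i] != pin[i-1]:
--             break
--     else:
--         return True
--     for i in range(1,4):
--         if pin[i] != str((int(pin[i-1])+1)%10):
--             return False
--     return True
-- ===== SOURCE B (Python) =====
-- def isWeak(pin):
--     head = pin[:4]
--     if len(set(head)) == 1:
--         return True
--     return _ascends(int(pin[0]), head[1:])
--
-- def _ascends(d, rest):
--     if rest == "":
--         return True
--     nxt = (d + 1) % 10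
--     return rest[0] == str(nxt) and _ascends(nxt, rest[1:])
-- ===== Notes on version B (the rewrite author's own statement) =====
-- stated objective: alternative
-- what changed: B replaces A's two index loops over range(1,4) by a set-cardinality check (len(set(pin[:4]))==1) for the all-same case and a tail-recursive helper that carries the expected next digit ((d+1)%10) down the remaining characters, instead of re-reading and re-converting pin[i-1] at every index.
import Mathlib
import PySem

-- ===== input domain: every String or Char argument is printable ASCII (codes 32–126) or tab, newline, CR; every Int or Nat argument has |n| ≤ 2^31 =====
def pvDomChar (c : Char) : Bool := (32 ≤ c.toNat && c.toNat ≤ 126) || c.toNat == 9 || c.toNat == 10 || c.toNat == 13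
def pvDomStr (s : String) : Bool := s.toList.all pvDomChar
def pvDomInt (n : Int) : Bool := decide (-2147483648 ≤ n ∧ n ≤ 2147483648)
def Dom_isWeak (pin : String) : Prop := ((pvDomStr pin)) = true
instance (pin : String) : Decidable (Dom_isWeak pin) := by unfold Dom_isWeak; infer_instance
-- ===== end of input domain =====

-- B replaces A's two index loops by a set-cardinality all-same check and a tail recursion
-- carrying the expected next digit (objective: alternative; return value only).
-- ===== PORT A =====
-- one iteration of A's second loop: pin[i] != str((int(pin[i-1])+1)%10); a raising point
-- (out-of-range index / non-digit int()) maps to false, which inside Pre_ Python never reaches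
-- with a different outcome (it has already returned False at an earlier index)
def isWeakA_step (pin : String) (i : Int) : Bool :=
  match PySem.Str.pyGet? pin i, PySem.Str.pyGet? pin (i - 1) with
  | some ci, some cp =>
      match PySem.Int.ofChars? [cp] with
      | some n => [ci] == PySem.Int.toChars (PySem.Int.mod (n + 1) 10)
      | none => false
  | _, _ => false

def isWeak (pin : String) : Bool :=
  -- for-else with break: the else-branch (return True) runs iff no mismatch; `all` is that loop
  if (PySem.List.pyRange 1 4 1).all
      (fun i => PySem.Str.pyGet? pin i == PySem.Str.pyGet? pin (i - 1)) then
    true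
  else
    -- second loop returns False at the first failed check: `all` over the same range
    (PySem.List.pyRange 1 4 1).all (fun i => isWeakA_step pin i)

-- ===== PORT B =====
-- _ascends(d, rest): rest == "" -> True; else rest[0] == str((d+1)%10) and recurse with (d+1)%10
def ascendsB (d : Int) (rest : List Char) : Bool :=
  match rest with
  | [] => true
  | c :: rs =>
      ([c] == PySem.Int.toChars (PySem.Int.mod (d + 1) 10)) &&
        ascendsB (PySem.Int.mod (d + 1) 10) rs

def isWeak_alt (pin : String) : Bool :=
  let head := PySem.List.slice pin.toList none (some 4)        -- head = pin[:4]
  if PySem.Set.len (PySem.Set.ofList head) == 1 then true      -- len(set(head)) == 1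
  else
    match PySem.Str.pyGet? pin 0 with                          -- int(pin[0]) (raise points → false,
    | some c0 =>                                               --  outside Pre_ Python B raises)
      match PySem.Int.ofChars? [c0] with
      | some d => ascendsB d (PySem.List.slice head (some 1) none)   -- _ascends(int(pin[0]), head[1:])
      | none => false
    | none => false

-- ===== PRECONDITION & SPEC =====
-- the ascending-digit string of length n starting at digit character c
def pvSeqFrom (c : Char) (n : Nat) : List Char :=
  (List.range n).map (fun k => Char.ofNat (48 + ((c.toNat - 48 + k) % 10)))

-- Pre_ is exactly where Python A returns: with ≥ 4 chars A raises ValueError unless the first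
-- four are equal or pin[0] is a digit; with 2–3 chars A returns (False) only when the pin is
-- not all-equal, starts with a digit, and is not a prefix of the ascending sequence (else
-- IndexError/ValueError); with < 2 chars A always raises IndexError.
def Pre_isWeak (pin : String) : Prop :=
  (4 ≤ pin.toList.length ∧
     ((pin.toList.take 4).all (fun x => x == pin.toList.headI) = true ∨ pin.toList.headI.isDigit = true)) ∨
  (2 ≤ pin.toList.length ∧ pin.toList.length ≤ 3 ∧
     ¬ pin.toList.all (fun x => x == pin.toList.headI) = true ∧ pin.toList.headI.isDigit = true ∧
     pin.toList ≠ pvSeqFrom pin.toList.headI pin.toList.length)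
instance (pin : String) : Decidable (Pre_isWeak pin) := by unfold Pre_isWeak; infer_instance

def pvWitness_isWeak : String := "1234"

def Spec_isWeak (pin : String) (out : Bool) : Prop := out = isWeak_alt pin
instance (pin : String) (out : Bool) : Decidable (Spec_isWeak pin out) := by unfold Spec_isWeak; infer_instance

-- ===== CLAIM (what is proved, stated in full; the proofs are below) =====
def Claim_equal_isWeak : Prop := ∀ (pin : String), Dom_isWeak pin → Pre_isWeak pin → Spec_isWeak pin (isWeak pin)

-- ===== LEMMAS AND PROOFS =====

-- a printable-ASCII character either fails int() as a 1-character string, or is a digit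
-- with known value and str-roundtrip
lemma pvCharIntCases (c : Char) (hc : pvDomChar c = true) :
    PySem.Int.ofChars? [c] = none ∨
    (PySem.Int.ofChars? [c] = some ((c.toNat : Int) - 48) ∧
      0 ≤ (c.toNat : Int) - 48 ∧ (c.toNat : Int) - 48 < 10 ∧
      PySem.Int.toChars ((c.toNat : Int) - 48) = [c]) := by
  have hc' : c = Char.ofNat c.toNat := (Char.ofNat_toNat c).symm
  simp only [pvDomChar, Bool.or_eq_true, Bool.and_eq_true, decide_eq_true_eq, beq_iff_eq] at hc
  rw [hc']
  have h9 : c.toNat ≤ 126 := by omega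
  have h0 : 9 ≤ c.toNat := by omega
  set n := c.toNat with hn
  clear_value n
  interval_cases n <;> decide

lemma pvToCharsDigit (e : Int) (h0 : 0 ≤ e) (h1 : e < 10) :
    PySem.Int.toChars e = [Char.ofNat (48 + e.toNat)] := by
  interval_cases e <;> decide

lemma pvOfCharsDigit (e : Int) (h0 : 0 ≤ e) (h1 : e < 10) :
    PySem.Int.ofChars? [Char.ofNat (48 + e.toNat)] = some e := by
  interval_cases e <;> decide

-- len(set([c0,c1,c2,c3])) == 1 is exactly the pairwise-equal chain
lemma pvSetLen4 (c0 c1 c2 c3 : Char) :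
    (PySem.Set.len (PySem.Set.ofList [c0, c1, c2, c3]) == 1) =
      ((c1 == c0) && (c2 == c1) && (c3 == c2)) := by
  by_cases h1 : c1 = c0 <;> by_cases h2 : c2 = c1 <;> by_cases h3 : c3 = c2 <;>
    simp [PySem.Set.ofList, PySem.Set.add, PySem.Set.contains, PySem.Set.len, h1, h2, h3] <;>
    split_ifs <;> simp_all

-- str((d+k)%10) as the single expected character, in pvSeqFrom's shape
lemma pvExpChar (d : Int) (k : Nat) (h0 : 0 ≤ d) (h1 : d < 10) :
    PySem.Int.toChars ((d + k) % 10) = [Char.ofNat (48 + ((d.toNat + k) % 10))] := by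
  have hn : ((d + (k : Int)) % 10).toNat = (d.toNat + k) % 10 := by omega
  rw [pvToCharsDigit _ (by omega) (by omega), hn]

set_option maxHeartbeats 2000000 in
lemma pvPortsAgree (pin : String) (hdom : Dom_isWeak pin) (hpre : Pre_isWeak pin) :
    isWeak pin = isWeak_alt pin := by
  have hdom' : ∀ c ∈ pin.toList, pvDomChar c = true := by
    simpa [Dom_isWeak, pvDomStr, List.all_eq_true] using hdom
  have hr14 : PySem.List.pyRange 1 4 1 = [1, 2, 3] := by decide
  have hsl : ∀ xs : List Char, PySem.List.slice xs none (some 4) = xs.take 4 := by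
    intro xs; exact_mod_cast PySem.List.slice_to_natCast (xs := xs) (b := 4)
  unfold Pre_isWeak at hpre
  unfold isWeak isWeak_alt isWeakA_step
  simp only [PySem.Str.pyGet?, hr14, hsl, PySem.List.slice_from_one, List.all_cons, List.all_nil,
    show ((1:Int) - 1 = 0) from by norm_num, show ((2:Int) - 1 = 1) from by norm_num,
    show ((3:Int) - 1 = 2) from by norm_num]
  generalize hl : pin.toList = l at hdom' hpre ⊢
  match l with
  | [] => simp [pvSeqFrom] at hpre
  | [c0] => simp [pvSeqFrom] at hpre
  | [c0, c1] =>
    have g0 : PySem.Chars.pyGet? [c0, c1] 0 = some c0 := by simp [pysem]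
    have g1 : PySem.Chars.pyGet? [c0, c1] 1 = some c1 := by simp [pysem]
    have g2 : PySem.Chars.pyGet? [c0, c1] 2 = none := by simp [pysem]
    have g3 : PySem.Chars.pyGet? [c0, c1] 3 = none := by simp [pysem]
    have htk : List.take 4 [c0, c1] = [c0, c1] := by simp
    simp only [List.length_cons, List.length_nil, List.headI, List.all_cons, List.all_nil] at hpre
    rcases hpre with ⟨h4, _⟩ | ⟨_, _, hne, _, hseq⟩
    · omega
    · have hcc : ¬ (c1 = c0) := by simpa using hne
      have hs2 : (PySem.Set.len (PySem.Set.ofList [c0, c1]) == 1) = (c1 == c0) := by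
        simp [PySem.Set.ofList, PySem.Set.add, PySem.Set.contains, PySem.Set.len, hcc]
      rcases pvCharIntCases c0 (hdom' c0 (by simp)) with h | ⟨h, h0, h1, ht⟩ <;>
        simp only [g0, g1, g2, g3, htk, hs2, List.tail_cons, h]
      · simp [hcc]
      · -- digit head: A's i=2 index miss makes A false; Pre_'s "not a prefix" makes B false
        have hE : PySem.Int.toChars (((c0.toNat : Int) - 48 + 1) % 10) =
            [Char.ofNat (48 + ((c0.toNat - 48 + 1) % 10))] := by
          have := pvExpChar ((c0.toNat : Int) - 48) 1 h0 h1
          simpa [show ((c0.toNat : Int) - 48).toNat = c0.toNat - 48 from by omega] using this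
        have hc1 : c1 ≠ Char.ofNat (48 + ((c0.toNat - 48 + 1) % 10)) := by
          intro hc; apply hseq
          have hc0 : (c0.toNat - 48) % 10 = c0.toNat - 48 := by omega
          have : Char.ofNat (48 + ((c0.toNat - 48) % 10)) = c0 := by
            rw [hc0]
            have : 48 + (c0.toNat - 48) = c0.toNat := by omega
            rw [this, Char.ofNat_toNat]
          simp [pvSeqFrom, List.range_succ, this, hc]
        simp [hcc, ascendsB, hE, hc1]
  | [c0, c1, c2] =>
    have g0 : PySem.Chars.pyGet? [c0, c1, c2] 0 = some c0 := by simp [pysem]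
    have g1 : PySem.Chars.pyGet? [c0, c1, c2] 1 = some c1 := by simp [pysem]
    have g2 : PySem.Chars.pyGet? [c0, c1, c2] 2 = some c2 := by simp [pysem]
    have g3 : PySem.Chars.pyGet? [c0, c1, c2] 3 = none := by simp [pysem]
    have htk : List.take 4 [c0, c1, c2] = [c0, c1, c2] := by simp
    simp only [List.length_cons, List.length_nil, List.headI, List.all_cons, List.all_nil] at hpre
    rcases hpre with ⟨h4, _⟩ | ⟨_, _, hne, _, hseq⟩
    · omega
    · have hnall : ¬ (c1 = c0 ∧ c2 = c0) := by simpa using hne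
      have hs3 : (PySem.Set.len (PySem.Set.ofList [c0, c1, c2]) == 1) = false := by
        by_cases a1 : c1 = c0 <;> by_cases a2 : c2 = c0 <;>
          simp_all [PySem.Set.ofList, PySem.Set.add, PySem.Set.contains, PySem.Set.len] <;>
          split_ifs <;> simp_all
      rcases pvCharIntCases c0 (hdom' c0 (by simp)) with h | ⟨h, h0, h1, ht⟩ <;>
        simp only [g0, g1, g2, g3, htk, hs3, List.tail_cons, h]
      · simp
      · set d : Int := (c0.toNat : Int) - 48 with hdd
        have hd : d.toNat = c0.toNat - 48 := by omega
        have hE1 : PySem.Int.toChars ((d + 1) % 10) = [Char.ofNat (48 + ((c0.toNat - 48 + 1) % 10))] := by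
          have := pvExpChar d 1 h0 h1; simpa [hd] using this
        have hE2 : PySem.Int.toChars ((d + 2) % 10) = [Char.ofNat (48 + ((c0.toNat - 48 + 2) % 10))] := by
          have := pvExpChar d 2 h0 h1; simpa [hd] using this
        have hc0eq : Char.ofNat (48 + ((c0.toNat - 48) % 10)) = c0 := by
          have hc0 : (c0.toNat - 48) % 10 = c0.toNat - 48 := by omega
          rw [hc0]
          have : 48 + (c0.toNat - 48) = c0.toNat := by omega
          rw [this, Char.ofNat_toNat]
        have hs1 : ((d + 1) % 10 + 1) % 10 = (d + 2) % 10 := by omega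
        have hseq' : ¬ (c1 = Char.ofNat (48 + ((c0.toNat - 48 + 1) % 10)) ∧
                        c2 = Char.ofNat (48 + ((c0.toNat - 48 + 2) % 10))) := by
          rintro ⟨x1, x2⟩; apply hseq
          simp [pvSeqFrom, List.range_succ, hc0eq, x1, x2]
        by_cases x1 : c1 = Char.ofNat (48 + ((c0.toNat - 48 + 1) % 10))
        · have x2 : ¬ c2 = Char.ofNat (48 + ((c0.toNat - 48 + 2) % 10)) := fun hh => hseq' ⟨x1, hh⟩
          simp [ascendsB, hE1, x1, hs1, hE2, x2]
        · simp [ascendsB, hE1, x1]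
  | c0 :: c1 :: c2 :: c3 :: rest =>
    have g0 : PySem.Chars.pyGet? (c0 :: c1 :: c2 :: c3 :: rest) 0 = some c0 := by simp [pysem]
    have g1 : PySem.Chars.pyGet? (c0 :: c1 :: c2 :: c3 :: rest) 1 = some c1 := by simp [pysem]
    have g2 : PySem.Chars.pyGet? (c0 :: c1 :: c2 :: c3 :: rest) 2 = some c2 := by simp [pysem]
    have g3 : PySem.Chars.pyGet? (c0 :: c1 :: c2 :: c3 :: rest) 3 = some c3 := by simp [pysem]
    have htk : List.take 4 (c0 :: c1 :: c2 :: c3 :: rest) = [c0, c1, c2, c3] := by simp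
    rcases pvCharIntCases c0 (hdom' c0 (by simp)) with h | ⟨h, h0, h1, ht⟩ <;>
      simp only [g0, g1, g2, g3, htk, pvSetLen4, List.tail_cons, h]
    · -- non-digit head: Pre_ forces the all-same branch on both sides
      simp only [List.length_cons, List.headI, List.take, List.all_cons, List.all_nil] at hpre
      rcases hpre with ⟨_, hall | hdig⟩ | ⟨_, h3, _⟩
      · have : c1 = c0 ∧ c2 = c0 ∧ c3 = c0 := by simpa using hall
        obtain ⟨a1, a2, a3⟩ := this
        simp [a1, a2, a3]
      · -- c0 is a digit but int() failed: impossible on Dom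
        exfalso
        have hge : 48 ≤ c0.toNat ∧ c0.toNat ≤ 57 := by
          simp [Char.isDigit] at hdig
          obtain ⟨a, b⟩ := hdig
          exact ⟨UInt32.le_iff_toNat_le.mp a, UInt32.le_iff_toNat_le.mp b⟩
        have hc' : c0 = Char.ofNat c0.toNat := (Char.ofNat_toNat c0).symm
        rw [hc'] at h
        obtain ⟨hlo, hhi⟩ := hge
        interval_cases hcv : c0.toNat <;> exact absurd h (by decide)
      · omega
    · set d : Int := (c0.toNat : Int) - 48 with hdd
      have hd : d.toNat = c0.toNat - 48 := by omega
      have hE1 : PySem.Int.toChars ((d + 1) % 10) = [Char.ofNat (48 + ((c0.toNat - 48 + 1) % 10))] := by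
        have := pvExpChar d 1 h0 h1; simpa [hd] using this
      have hE2 : PySem.Int.toChars ((d + 2) % 10) = [Char.ofNat (48 + ((c0.toNat - 48 + 2) % 10))] := by
        have := pvExpChar d 2 h0 h1; simpa [hd] using this
      have hE3 : PySem.Int.toChars ((d + 3) % 10) = [Char.ofNat (48 + ((c0.toNat - 48 + 3) % 10))] := by
        have := pvExpChar d 3 h0 h1; simpa [hd] using this
      have hs1 : ((d + 1) % 10 + 1) % 10 = (d + 2) % 10 := by omega
      have hs2 : ((d + 2) % 10 + 1) % 10 = (d + 3) % 10 := by omega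
      have o1 : PySem.Int.ofChars? [Char.ofNat (48 + ((c0.toNat - 48 + 1) % 10))] = some ((d + 1) % 10) := by
        have := pvOfCharsDigit ((d + 1) % 10) (by omega) (by omega)
        have hn : ((d + 1) % 10).toNat = (c0.toNat - 48 + 1) % 10 := by omega
        rwa [hn] at this
      have o2 : PySem.Int.ofChars? [Char.ofNat (48 + ((c0.toNat - 48 + 2) % 10))] = some ((d + 2) % 10) := by
        have := pvOfCharsDigit ((d + 2) % 10) (by omega) (by omega)
        have hn : ((d + 2) % 10).toNat = (c0.toNat - 48 + 2) % 10 := by omega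
        rwa [hn] at this
      by_cases x1 : c1 = Char.ofNat (48 + ((c0.toNat - 48 + 1) % 10))
      case neg =>
        have b1 : (c1 == Char.ofNat (48 + ((c0.toNat - 48 + 1) % 10))) = false := by simpa using x1
        simp [ascendsB, hE1, b1, Bool.and_assoc]
      case pos =>
        subst x1
        by_cases x2 : c2 = Char.ofNat (48 + ((c0.toNat - 48 + 2) % 10))
        case neg =>
          have b2 : (c2 == Char.ofNat (48 + ((c0.toNat - 48 + 2) % 10))) = false := by simpa using x2
          simp [ascendsB, hE1, o1, hs1, hE2, b2, Bool.and_assoc]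
        case pos =>
          subst x2
          by_cases x3 : c3 = Char.ofNat (48 + ((c0.toNat - 48 + 3) % 10))
          case neg =>
            have b3 : (c3 == Char.ofNat (48 + ((c0.toNat - 48 + 3) % 10))) = false := by simpa using x3
            simp [ascendsB, hE1, o1, hs1, hE2, o2, hs2, hE3, b3, Bool.and_assoc]
          case pos =>
            subst x3
            simp [ascendsB, hE1, o1, hs1, hE2, o2, hs2, hE3, Bool.and_assoc]

theorem isWeak_spec : Claim_equal_isWeak := by
  intro pin hdom hpre
  unfold Spec_isWeak
  exact pvPortsAgree pin hdom hpre
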